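-- pv_equiv track=rewrite | github.com/chris9390/Algorithm | programmers/dynamic_programming/dp_2.py | solution
-- ===== SOURCE A (Python) =====
-- def solution(N):
--
--     a = 1
--     b = 1
--     fibo_list = [1, 1]
--
--     for i in range(0, N-2):
--         c = a + b
--         fibo_list.append(c)
--
--         a = b
--         b = c
--
--     return (fibo_list[N-1] + fibo_list[N-2]) * 2 + (fibo_list[N-2] + fibo_list[N-3]) * 2
-- ===== SOURCE B (Python) =====
-- def solution(N):
--     # fast-doubling Fibonacci: fd(n) = (F(n), F(n+1)) with F(0)=0, F(1)=1
--     def fd(n):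
--         if n == 0:
--             return (0, 1)
--         a, b = fd(n >> 1)
--         c = a * (2 * b - a)
--         d = a * a + b * b
--         if n & 1:
--             return (d, c + d)
--         return (c, d)
--     return 2 * fd(N + 2)[0]
-- ===== Notes on version B (the rewrite author's own statement) =====
-- stated objective: faster
-- what changed: Replaces the O(N) loop that builds the whole Fibonacci list with recursive fast-doubling computing 2*F(N+2) directly.
-- intended difference: For N = 1 or 2 A returns 8 via accidental negative-index wraparound into the seed list [1,1]; B returns the intended series value 2*F(N+2) (4 resp. 6). — e.g. on solution(1): A returns 8, B returns 4
import Mathlib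
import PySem

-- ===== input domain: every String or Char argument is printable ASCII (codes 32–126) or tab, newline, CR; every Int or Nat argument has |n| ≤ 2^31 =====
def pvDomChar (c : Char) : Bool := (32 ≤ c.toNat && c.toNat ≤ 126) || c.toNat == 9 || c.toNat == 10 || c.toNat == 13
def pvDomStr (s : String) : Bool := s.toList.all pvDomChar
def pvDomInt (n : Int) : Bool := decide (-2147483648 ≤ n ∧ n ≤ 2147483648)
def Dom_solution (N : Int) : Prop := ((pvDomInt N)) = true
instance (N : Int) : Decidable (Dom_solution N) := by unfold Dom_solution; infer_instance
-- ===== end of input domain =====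

-- B replaces A's O(N) list-building loop with O(log N) fast-doubling Fibonacci;
-- for N = 1, 2 (negative-index wraparound in A) B returns the intended 2*F(N+2) (see D_solution).


-- ===== PORT A =====
def solution (N : Int) : Int :=
  let st := (PySem.List.pyRange 0 (N - 2) 1).foldl
    (fun (st : Int × Int × List Int) _i =>
      let a := st.1
      let b := st.2.1
      let fibo_list := st.2.2
      let c := a + b
      (b, c, fibo_list ++ [c]))
    (1, 1, ([1, 1] : List Int))
  let fibo_list := st.2.2
  ((PySem.List.pyGet? fibo_list (N - 1)).getD 0 + (PySem.List.pyGet? fibo_list (N - 2)).getD 0) * 2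
    + ((PySem.List.pyGet? fibo_list (N - 2)).getD 0 + (PySem.List.pyGet? fibo_list (N - 3)).getD 0) * 2

-- ===== PORT B =====
-- fast-doubling: fd n = (F n, F (n+1)); Python's recursion on n >> 1 is made structural
-- with a fuel argument (fuel = n suffices since n/2 < n); otherwise step-for-step Source B.
def fdAux : Nat → Nat → Int × Int
  | _, 0 => (0, 1)
  | 0, _ + 1 => (0, 1)      -- fuel exhausted: unreachable for fuel ≥ n
  | fuel + 1, n + 1 =>
    let p := fdAux fuel ((n + 1) / 2)
    let a := p.1
    let b := p.2
    let c := a * (2 * b - a)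
    let d := a * a + b * b
    if (n + 1) % 2 = 1 then (d, c + d) else (c, d)

def fd (n : Nat) : Int × Int := fdAux n n

def solution_alt (N : Int) : Int := 2 * (fd (N + 2).toNat).1

-- ===== PRECONDITION & SPEC =====
-- A raises IndexError for N ≤ 0 (index N-3 is out of range even after wraparound).
def Pre_solution (N : Int) : Prop := 1 ≤ N
instance (N : Int) : Decidable (Pre_solution N) := by unfold Pre_solution; infer_instance
def pvWitness_solution : Int := 5
-- For N = 1 or 2 A returns 8 via accidental negative-index wraparound into the seed list [1,1];
-- B returns the intended series value 2*F(N+2) (4 resp. 6).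
def D_solution (N : Int) : Prop := N = 1 ∨ N = 2
instance (N : Int) : Decidable (D_solution N) := by unfold D_solution; infer_instance
def Spec_solution (N : Int) (out : Int) : Prop := ¬ D_solution N → out = solution_alt N
instance (N : Int) (out : Int) : Decidable (Spec_solution N out) := by unfold Spec_solution; infer_instance
def pvDiffWitness_solution : Int := 1
def pvDiffWitnessOut_solution : Int × Int := (8, 4)

-- ===== CLAIM (what is proved, stated in full; the proofs are below) =====
def Claim_unchanged_solution : Prop := ∀ (N : Int), Dom_solution N → Pre_solution N → Spec_solution N (solution N)
def Claim_changed_solution : Prop := Dom_solution (pvDiffWitness_solution) ∧ Pre_solution (pvDiffWitness_solution) ∧ D_solution (pvDiffWitness_solution) ∧ solution (pvDiffWitness_solution) = pvDiffWitnessOut_solution.1 ∧ solution_alt (pvDiffWitness_solution) = pvDiffWitnessOut_solution.2 ∧ pvDiffWitnessOut_solution.1 ≠ pvDiffWitnessOut_solution.2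
def Claim_exact_solution : Prop := ∀ (N : Int), Dom_solution N → Pre_solution N → D_solution N → solution N ≠ solution_alt N

-- ===== LEMMAS AND PROOFS =====
def fibI (n : Nat) : Int := (Nat.fib n : Int)

theorem fib_succ_succ (k : Nat) : fibI (k + 2) = fibI k + fibI (k + 1) := by
  unfold fibI; rw [Nat.fib_add_two]; push_cast; ring

theorem fib_even (h : Nat) : fibI (2 * h) = fibI h * (2 * fibI (h + 1) - fibI h) := by
  have hle : Nat.fib h ≤ 2 * Nat.fib (h + 1) := by
    have h1 : Nat.fib h ≤ Nat.fib (h + 1) := Nat.fib_mono (by omega)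
    omega
  unfold fibI
  rw [Nat.fib_two_mul]
  push_cast [Nat.cast_sub hle]
  ring

theorem fib_odd (h : Nat) :
    fibI (2 * h + 1) = fibI h * fibI h + fibI (h + 1) * fibI (h + 1) := by
  unfold fibI
  rw [Nat.fib_two_mul_add_one]
  push_cast
  ring

theorem fdAux_eq (fuel : Nat) : ∀ n, n ≤ fuel → fdAux fuel n = (fibI n, fibI (n + 1)) := by
  induction fuel with
  | zero =>
    intro n hn
    obtain rfl : n = 0 := by omega
    simp [fdAux, fibI]
  | succ f ih =>
    intro n hn
    match n with
    | 0 => simp [fdAux, fibI]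
    | Nat.succ m =>
      have hp := ih ((m + 1) / 2) (by omega)
      simp only [fdAux, hp, Nat.succ_eq_add_one]
      obtain ⟨q, hqdef⟩ : ∃ q, (m + 1) / 2 = q := ⟨_, rfl⟩
      rw [hqdef]
      by_cases hpar : (m + 1) % 2 = 1
      · rw [if_pos hpar, Prod.mk.injEq]
        have hq : m + 1 = 2 * q + 1 := by omega
        constructor
        · rw [hq, fib_odd]
        · rw [show m + 1 + 1 = 2 * q + 2 from by omega, fib_succ_succ (2 * q),
            fib_even, fib_odd]
      · rw [if_neg hpar, Prod.mk.injEq]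
        have hq : m + 1 = 2 * q := by omega
        constructor
        · rw [hq, fib_even]
        · rw [show m + 1 + 1 = 2 * q + 1 from by omega, fib_odd]

theorem fd_eq (n : Nat) : fd n = (fibI n, fibI (n + 1)) := fdAux_eq n n le_rfl

theorem foldl_const_iter {α β : Type} (g : α → α) (l : List β) (init : α) :
    l.foldl (fun s _ => g s) init = g^[l.length] init := by
  induction l generalizing init with
  | nil => rfl
  | cons x xs ih => simp [List.foldl_cons, ih, Function.iterate_succ_apply]

def aStep (st : Int × Int × List Int) : Int × Int × List Int :=
  (st.2.1, st.1 + st.2.1, st.2.2 ++ [st.1 + st.2.1])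

theorem aStep_iter (k : Nat) :
    aStep^[k] (1, 1, ([1, 1] : List Int)) =
      (fibI (k + 1), fibI (k + 2), (List.range (k + 2)).map (fun i => fibI (i + 1))) := by
  induction k with
  | zero => simp [fibI, List.range_succ]
  | succ m ih =>
    rw [Function.iterate_succ_apply', ih]
    have hf : fibI (m + 1) + fibI (m + 2) = fibI (m + 3) := by
      have h0 := fib_succ_succ (m + 1)
      rw [show m + 1 + 2 = m + 3 from by omega, show m + 1 + 1 = m + 2 from by omega] at h0
      exact h0.symm
    show (fibI (m + 2), fibI (m + 1) + fibI (m + 2),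
        (List.range (m + 2)).map (fun i => fibI (i + 1)) ++ [fibI (m + 1) + fibI (m + 2)]) =
      (fibI (m + 2), fibI (m + 3), (List.range (m + 3)).map (fun i => fibI (i + 1)))
    rw [hf, show List.range (m + 3) = List.range (m + 2) ++ [m + 2] from List.range_succ,
      List.map_append, List.map_singleton, show m + 2 + 1 = m + 3 from by omega]

theorem getElem?_fibmap (n i : Nat) (hi : i < n) :
    ((List.range n).map (fun i => fibI (i + 1)))[i]? = some (fibI (i + 1)) := by
  simp [hi]

theorem solution_eq_fib (n : Nat) (hn : 3 ≤ n) : solution (n : Int) = 2 * fibI (n + 2) := by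
  have hlen : (PySem.List.pyRange 0 ((n : Int) - 2) 1).length = n - 2 := by
    rw [PySem.List.length_pyRange_one]; omega
  have hL : ((PySem.List.pyRange 0 ((n : Int) - 2) 1).foldl
        (fun (s : Int × Int × List Int) (_ : Int) => aStep s) (1, 1, ([1, 1] : List Int))).2.2
      = (List.range n).map (fun i => fibI (i + 1)) := by
    rw [foldl_const_iter, hlen, aStep_iter, show n - 2 + 2 = n from by omega]
  show ((PySem.List.pyGet? ((PySem.List.pyRange 0 ((n : Int) - 2) 1).foldl
          (fun (s : Int × Int × List Int) (_ : Int) => aStep s) (1, 1, ([1, 1] : List Int))).2.2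
          ((n : Int) - 1)).getD 0 +
        (PySem.List.pyGet? ((PySem.List.pyRange 0 ((n : Int) - 2) 1).foldl
          (fun (s : Int × Int × List Int) (_ : Int) => aStep s) (1, 1, ([1, 1] : List Int))).2.2
          ((n : Int) - 2)).getD 0) * 2 +
      ((PySem.List.pyGet? ((PySem.List.pyRange 0 ((n : Int) - 2) 1).foldl
          (fun (s : Int × Int × List Int) (_ : Int) => aStep s) (1, 1, ([1, 1] : List Int))).2.2
          ((n : Int) - 2)).getD 0 +
        (PySem.List.pyGet? ((PySem.List.pyRange 0 ((n : Int) - 2) 1).foldl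
          (fun (s : Int × Int × List Int) (_ : Int) => aStep s) (1, 1, ([1, 1] : List Int))).2.2
          ((n : Int) - 3)).getD 0) * 2 = 2 * fibI (n + 2)
  rw [hL]
  have e1 : ((n : Int) - 1) = ((n - 1 : Nat) : Int) := by omega
  have e2 : ((n : Int) - 2) = ((n - 2 : Nat) : Int) := by omega
  have e3 : ((n : Int) - 3) = ((n - 3 : Nat) : Int) := by omega
  rw [e1, e2, e3]
  simp only [PySem.List.pyGet?_natCast,
    getElem?_fibmap n (n - 1) (by omega), getElem?_fibmap n (n - 2) (by omega),
    getElem?_fibmap n (n - 3) (by omega), Option.getD_some]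
  rw [show n - 1 + 1 = n from by omega, show n - 2 + 1 = n - 1 from by omega,
    show n - 3 + 1 = n - 2 from by omega]
  obtain ⟨m, rfl⟩ : ∃ m, n = m + 3 := ⟨n - 3, by omega⟩
  rw [show m + 3 - 1 = m + 2 from by omega, show m + 3 - 2 = m + 1 from by omega]
  have A1 : fibI (m + 3) = fibI (m + 1) + fibI (m + 2) := by
    have h0 := fib_succ_succ (m + 1)
    rw [show m + 1 + 2 = m + 3 from by omega, show m + 1 + 1 = m + 2 from by omega] at h0
    exact h0
  have A2 : fibI (m + 4) = fibI (m + 2) + fibI (m + 3) := by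
    have h0 := fib_succ_succ (m + 2)
    rw [show m + 2 + 2 = m + 4 from by omega, show m + 2 + 1 = m + 3 from by omega] at h0
    exact h0
  have A3 : fibI (m + 5) = fibI (m + 3) + fibI (m + 4) := by
    have h0 := fib_succ_succ (m + 3)
    rw [show m + 3 + 2 = m + 5 from by omega, show m + 3 + 1 = m + 4 from by omega] at h0
    exact h0
  rw [show m + 3 + 2 = m + 5 from by omega, A3, A2, A1]
  ring

-- ===== VERDICT (by name: the statement is the Claim_ definition above) =====
theorem solution_spec : Claim_unchanged_solution := by
  intro N _hdom hpre hD
  unfold Pre_solution at hpre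
  unfold D_solution at hD
  have h3 : 3 ≤ N := by
    rcases lt_or_ge N 3 with h | h
    · exact absurd (by omega : N = 1 ∨ N = 2) hD
    · exact h
  obtain ⟨n, rfl⟩ : ∃ n : Nat, N = (n : Int) := ⟨N.toNat, by omega⟩
  have hn : 3 ≤ n := by exact_mod_cast h3
  show solution (n : Int) = solution_alt (n : Int)
  rw [solution_eq_fib n hn]
  unfold solution_alt
  rw [show ((n : Int) + 2).toNat = n + 2 from by omega, fd_eq (n + 2)]

theorem solution_changed : Claim_changed_solution := by
  unfold Claim_changed_solution; decide

theorem solution_tight : Claim_exact_solution := by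
  intro N _hdom _hpre hD
  unfold D_solution at hD
  rcases hD with rfl | rfl <;> decide
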